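-- pv_equiv track=rewrite | github.com/KutyavinaVV/python-lessons | lesson-2/symmetric_difference.py | custom_symmetric_difference
-- ===== SOURCE A (Python) =====
-- def custom_symmetric_difference(s1, s2):
--     diff = set()
--     for i in s1:
--         if i not in s2:
--             diff.add(i)
--
--     for i in s2:
--         if i not in s1:
--             diff.add(i)
--     return diff
-- ===== SOURCE B (Python) =====
-- def custom_symmetric_difference(s1, s2):
--     # Tally each element once in a dict of bit flags (1 = seen in s1, 2 = seen in s2),
--     # then keep the elements tagged by exactly one side. No membership scans at all.
--     tag = {}
--     for x in s1:
--         tag[x] = tag.get(x, 0) | 1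
--     for x in s2:
--         tag[x] = tag.get(x, 0) | 2
--     return {x for x, t in tag.items() if t != 3}
-- ===== Notes on version B (the rewrite author's own statement) =====
-- stated objective: alternative
-- what changed: Replaces A's two membership-filtering loops (each scanning the other collection per element) with a one-structure tally: a dict of bit flags marking which side(s) each element occurred in, then a comprehension keeping the elements flagged by exactly one side.
import Mathlib
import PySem

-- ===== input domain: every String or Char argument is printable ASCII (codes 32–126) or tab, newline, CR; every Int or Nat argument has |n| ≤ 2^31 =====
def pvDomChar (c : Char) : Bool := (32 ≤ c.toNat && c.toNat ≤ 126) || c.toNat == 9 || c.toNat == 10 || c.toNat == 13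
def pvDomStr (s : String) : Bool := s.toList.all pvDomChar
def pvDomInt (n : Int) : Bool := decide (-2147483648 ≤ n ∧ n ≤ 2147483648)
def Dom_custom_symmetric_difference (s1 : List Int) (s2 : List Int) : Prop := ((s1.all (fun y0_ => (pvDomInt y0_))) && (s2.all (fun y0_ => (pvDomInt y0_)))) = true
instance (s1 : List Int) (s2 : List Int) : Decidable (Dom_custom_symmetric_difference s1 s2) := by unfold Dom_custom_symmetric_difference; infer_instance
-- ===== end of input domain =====

-- B replaces A's two membership-filtering loops (a scan of the other collection per
-- element) by a dict of bit flags marking which side(s) each element occurred in,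
-- followed by a comprehension keeping the elements flagged by exactly one side.

-- ===== PORT A =====
-- literal transliteration: start from an empty set, add elements of s1 not in the list s2,
-- then elements of s2 not in the list s1.
def custom_symmetric_difference (s1 : List Int) (s2 : List Int) : List Int :=
  let diff : PySem.Set Int := PySem.Set.empty
  let diff := s1.foldl (fun d i => if !(s2.contains i) then PySem.Set.add d i else d) diff
  let diff := s2.foldl (fun d i => if !(s1.contains i) then PySem.Set.add d i else d) diff
  diff

-- ===== PORT B =====
-- literal transliteration of Source B: tag[x] = tag.get(x, 0) | 1 over s1, then | 2 over s2,
-- then the set comprehension {x for x, t in tag.items() if t != 3}.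
def custom_symmetric_difference_alt (s1 : List Int) (s2 : List Int) : List Int :=
  let tag : PySem.Dict Int Int := PySem.Dict.empty
  let tag := s1.foldl (fun d x => d.insert x (PySem.Int.bor (d.getD x 0) 1)) tag
  let tag := s2.foldl (fun d x => d.insert x (PySem.Int.bor (d.getD x 0) 2)) tag
  tag.items.foldl (fun s p => if p.2 != 3 then PySem.Set.add s p.1 else s) PySem.Set.empty

-- ===== PRECONDITION & SPEC =====
def Spec_custom_symmetric_difference (s1 : List Int) (s2 : List Int) (out : List Int) : Prop := out = custom_symmetric_difference_alt s1 s2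
instance (s1 : List Int) (s2 : List Int) (out : List Int) : Decidable (Spec_custom_symmetric_difference s1 s2 out) := by unfold Spec_custom_symmetric_difference; infer_instance

-- ===== CLAIM (what is proved, stated in full; the proofs are below) =====
def Claim_equal_custom_symmetric_difference : Prop := ∀ (s1 : List Int) (s2 : List Int), Dom_custom_symmetric_difference s1 s2 → Spec_custom_symmetric_difference s1 s2 (custom_symmetric_difference s1 s2)

-- ===== LEMMAS AND PROOFS =====

-- a fold of guarded Set.add over any list equals folding Set.add over the kept keys
theorem pv_fold_guard {α : Type} (q : α → Bool) (key : α → Int) (l : List α) (acc : PySem.Set Int) :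
    l.foldl (fun d i => if q i then PySem.Set.add d (key i) else d) acc
      = ((l.filter q).map key).foldl PySem.Set.add acc := by
  induction l generalizing acc with
  | nil => rfl
  | cons x xs ih =>
    by_cases h : q x <;> simp [h, ih]

-- filter distributes over Set.add
theorem pv_filter_add (p : Int → Bool) (acc : PySem.Set Int) (x : Int) :
    (PySem.Set.add acc x).filter p
      = if p x then PySem.Set.add (acc.filter p) x else acc.filter p := by
  by_cases hm : x ∈ acc
  · have hma : PySem.Set.add acc x = acc := by simp [PySem.Set.add, hm]
    rw [hma]
    by_cases hp : p x
    · have hmf : x ∈ acc.filter p := List.mem_filter.mpr ⟨hm, hp⟩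
      simp [hp, PySem.Set.add, hmf]
    · simp [hp]
  · have hma : PySem.Set.add acc x = acc ++ [x] := by simp [PySem.Set.add, hm]
    rw [hma, List.filter_append]
    by_cases hp : p x
    · have hnm : x ∉ acc.filter p := fun h => hm (List.mem_filter.mp h).1
      simp [hp, PySem.Set.add, hnm]
    · simp [hp]

-- filter commutes with folding Set.add
theorem pv_filter_foldl_add (p : Int → Bool) (l : List Int) (acc : PySem.Set Int) :
    (l.foldl PySem.Set.add acc).filter p = (l.filter p).foldl PySem.Set.add (acc.filter p) := by
  induction l generalizing acc with
  | nil => rfl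
  | cons x xs ih =>
    rw [List.foldl_cons, ih, pv_filter_add, List.filter_cons]
    by_cases hp : p x <;> simp [hp]

-- building a set from a filtered list = filtering the built set
theorem pv_ofList_filter (p : Int → Bool) (l : List Int) :
    PySem.Set.ofList (l.filter p) = (PySem.Set.ofList l).filter p := by
  rw [PySem.Set.ofList, PySem.Set.ofList, pv_filter_foldl_add]
  rfl

-- folding Set.add over elements disjoint from a prefix s leaves s untouched in front
theorem pv_foldl_add_disjoint (l : List Int) (s acc : List Int)
    (h : ∀ x ∈ l, x ∉ s) :
    l.foldl PySem.Set.add (s ++ acc) = s ++ l.foldl PySem.Set.add acc := by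
  induction l generalizing acc with
  | nil => rfl
  | cons x xs ih =>
    have hx : x ∉ s := h x List.mem_cons_self
    have h' : ∀ y ∈ xs, y ∉ s := fun y hy => h y (List.mem_cons_of_mem _ hy)
    rw [List.foldl_cons, List.foldl_cons]
    by_cases hc : x ∈ acc
    · have e1 : PySem.Set.add (s ++ acc) x = s ++ acc := by
        simp [PySem.Set.add, List.mem_append, hx, hc]
      have e2 : PySem.Set.add acc x = acc := by simp [PySem.Set.add, hc]
      rw [e1, e2, ih _ h']
    · have e1 : PySem.Set.add (s ++ acc) x = s ++ (acc ++ [x]) := by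
        simp [PySem.Set.add, List.mem_append, hx, hc]
      have e2 : PySem.Set.add acc x = acc ++ [x] := by simp [PySem.Set.add, hc]
      rw [e1, e2, ih _ h']

-- lookup in a dict whose front block maps each listed key y to v y
theorem pv_get?_mkmap (v : Int → Int) (l : List Int) (rest : List (Int × Int)) (x : Int) :
    PySem.Dict.get? (PySem.Dict.mk (l.map (fun y => (y, v y)) ++ rest)) x
      = if x ∈ l then some (v x) else PySem.Dict.get? (PySem.Dict.mk rest) x := by
  induction l with
  | nil => simp
  | cons y ys ih =>
    rw [List.map_cons, List.cons_append, PySem.Dict.get?_mk_cons]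
    by_cases hyx : y = x
    · subst hyx; simp
    · simp [hyx, ih, Ne.symm hyx]

theorem pv_getD_mkmap (v : Int → Int) (l : List Int) (rest : List (Int × Int)) (x d0 : Int) :
    PySem.Dict.getD (PySem.Dict.mk (l.map (fun y => (y, v y)) ++ rest)) x d0
      = if x ∈ l then v x else PySem.Dict.getD (PySem.Dict.mk rest) x d0 := by
  rw [PySem.Dict.getD_eq_get?_getD, PySem.Dict.getD_eq_get?_getD, pv_get?_mkmap]
  by_cases h : x ∈ l <;> simp [h]

theorem pv_getD_mk_nil (x d0 : Int) :
    PySem.Dict.getD (PySem.Dict.mk ([] : List (Int × Int))) x d0 = d0 := rfl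

-- membership in the keys of such a dict
theorem pv_contains_mkmap (v : Int → Int) (l : List Int) (rest : List (Int × Int)) (x : Int) :
    PySem.Dict.contains (PySem.Dict.mk (l.map (fun y => (y, v y)) ++ rest)) x
      = (l.contains x || PySem.Dict.contains (PySem.Dict.mk rest) x) := by
  rw [PySem.Dict.contains_eq_isSome_get?, PySem.Dict.contains_eq_isSome_get?, pv_get?_mkmap]
  by_cases h : x ∈ l <;> simp [h]

-- PHASE 1: tagging every element of l with flag 1 builds set(l) with all values 1
theorem pv_phase1 (l : List Int) (S : List Int) :
    l.foldl (fun d x => d.insert x (PySem.Int.bor (d.getD x 0) 1))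
        (PySem.Dict.mk (S.map (fun y => (y, (1 : Int)))))
      = PySem.Dict.mk ((l.foldl PySem.Set.add S).map (fun y => (y, (1 : Int)))) := by
  induction l generalizing S with
  | nil => rfl
  | cons x xs ih =>
    rw [List.foldl_cons, List.foldl_cons]
    have hget := pv_getD_mkmap (fun _ => (1 : Int)) S [] x 0
    simp only [List.append_nil] at hget
    by_cases hm : x ∈ S
    · have hD : PySem.Dict.getD (PySem.Dict.mk (S.map (fun y => (y, (1:Int))))) x 0 = 1 := by
        rw [hget]; simp [hm]
      have hC : PySem.Dict.contains (PySem.Dict.mk (S.map (fun y => (y, (1:Int))))) x = true := by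
        have := pv_contains_mkmap (fun _ => (1 : Int)) S [] x
        simp only [List.append_nil] at this
        simp [this, hm]
      rw [hD]
      have hins : (PySem.Dict.mk (S.map (fun y => (y, (1:Int))))).insert x (PySem.Int.bor 1 1)
          = PySem.Dict.mk (S.map (fun y => (y, (1:Int)))) := by
        apply PySem.Dict.ext
        rw [PySem.Dict.items_insert_of_contains _ _ hC]
        simp only [List.map_map]
        refine List.map_congr_left (fun y _ => ?_)
        by_cases hyx : y = x
        · subst hyx; simp [show PySem.Int.bor 1 1 = 1 by decide]
        · simp [hyx]
      rw [hins, ih, PySem.Set.add_of_mem hm]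
    · have hD : PySem.Dict.getD (PySem.Dict.mk (S.map (fun y => (y, (1:Int))))) x 0 = 0 := by
        rw [hget]; simp [hm, pv_getD_mk_nil]
      have hC : PySem.Dict.contains (PySem.Dict.mk (S.map (fun y => (y, (1:Int))))) x = false := by
        have := pv_contains_mkmap (fun _ => (1 : Int)) S [] x
        simp only [List.append_nil] at this
        simp [this, hm]
      rw [hD]
      have hins : (PySem.Dict.mk (S.map (fun y => (y, (1:Int))))).insert x (PySem.Int.bor 0 1)
          = PySem.Dict.mk ((S ++ [x]).map (fun y => (y, (1:Int)))) := by
        apply PySem.Dict.ext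
        rw [PySem.Dict.items_insert_of_not_contains _ _ hC]
        simp [show PySem.Int.bor 0 1 = 1 by decide]
      rw [hins, ih, PySem.Set.add_of_not_mem hm]

-- PHASE 2 invariant: flagging elements of l with 2 over a state of s1-keys (value 1 or 3)
-- followed by fresh s2-keys (value 2)
theorem pv_phase2 (l : List Int) (s1d M T : List Int)
    (hdisj : ∀ y ∈ T, y ∉ s1d) :
    l.foldl (fun d x => d.insert x (PySem.Int.bor (d.getD x 0) 2))
        (PySem.Dict.mk (s1d.map (fun y => (y, if M.contains y then (3:Int) else 1))
          ++ T.map (fun y => (y, (2 : Int)))))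
      = PySem.Dict.mk (s1d.map (fun y => (y, if (M.contains y || l.contains y) then (3:Int) else 1))
          ++ ((l.filter (fun x => !(s1d.contains x))).foldl PySem.Set.add T).map (fun y => (y, (2 : Int)))) := by
  induction l generalizing M T with
  | nil => simp
  | cons x xs ih =>
    rw [List.foldl_cons]
    have hget := pv_getD_mkmap (fun y => if M.contains y then (3:Int) else 1) s1d
      (T.map (fun y => (y, (2:Int)))) x 0
    have hget2 := pv_getD_mkmap (fun _ => (2:Int)) T [] x 0
    simp only [List.append_nil] at hget2
    have hcontains := pv_contains_mkmap (fun y => if M.contains y then (3:Int) else 1) s1d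
      (T.map (fun y => (y, (2:Int)))) x
    have hcontains2 := pv_contains_mkmap (fun _ => (2:Int)) T [] x
    simp only [List.append_nil] at hcontains2
    by_cases hm : x ∈ s1d
    · -- x is an s1 key: its flag becomes 3
      have hD : PySem.Dict.getD (PySem.Dict.mk (s1d.map (fun y => (y, if M.contains y then (3:Int) else 1))
            ++ T.map (fun y => (y, (2:Int))))) x 0 = if M.contains x then (3:Int) else 1 := by
        rw [hget]; simp [hm]
      have hC : PySem.Dict.contains (PySem.Dict.mk (s1d.map (fun y => (y, if M.contains y then (3:Int) else 1))
            ++ T.map (fun y => (y, (2:Int))))) x = true := by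
        simp [hm]
      rw [hD]
      have hbor : PySem.Int.bor (if M.contains x then (3:Int) else 1) 2 = 3 := by
        by_cases hMx : M.contains x = true
        · rw [if_pos hMx]; decide
        · rw [if_neg hMx]; decide
      rw [hbor]
      have hins : (PySem.Dict.mk (s1d.map (fun y => (y, if M.contains y then (3:Int) else 1))
            ++ T.map (fun y => (y, (2:Int))))).insert x 3
          = PySem.Dict.mk (s1d.map (fun y => (y, if (x :: M).contains y then (3:Int) else 1))
            ++ T.map (fun y => (y, (2:Int)))) := by
        apply PySem.Dict.ext
        rw [PySem.Dict.items_insert_of_contains _ _ hC]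
        rw [List.map_append, List.map_map, List.map_map]
        congr 1
        · refine List.map_congr_left (fun y _ => ?_)
          by_cases hyx : y = x
          · subst hyx; simp
          · simp [hyx]
        · refine List.map_congr_left (fun y hy => ?_)
          have : y ≠ x := fun h => (hdisj y hy) (h ▸ hm)
          simp [this]
      rw [hins, ih _ _ hdisj]
      have hfilt : (x :: xs).filter (fun z => !(s1d.contains z)) = xs.filter (fun z => !(s1d.contains z)) := by
        simp [hm]
      rw [hfilt]
      have hcond : ∀ y : Int, (if ((x :: M).contains y || xs.contains y) = true then (3:Int) else 1)
          = (if (M.contains y || (x :: xs).contains y) = true then (3:Int) else 1) := by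
        intro y
        have : ((x :: M).contains y || xs.contains y) = (M.contains y || (x :: xs).contains y) := by
          simp only [List.contains_cons]
          by_cases h1 : y == x <;> by_cases h2 : M.contains y = true <;> simp_all
        rw [this]
      simp only [hcond]
    · -- x is not an s1 key
      have hD : PySem.Dict.getD (PySem.Dict.mk (s1d.map (fun y => (y, if M.contains y then (3:Int) else 1))
            ++ T.map (fun y => (y, (2:Int))))) x 0 = if x ∈ T then (2:Int) else 0 := by
        rw [hget]; simp [hm, hget2, pv_getD_mk_nil]
      have hfilt : (x :: xs).filter (fun z => !(s1d.contains z))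
          = x :: xs.filter (fun z => !(s1d.contains z)) := by
        simp [hm]
      by_cases hT : x ∈ T
      · have hD' : PySem.Dict.getD (PySem.Dict.mk (s1d.map (fun y => (y, if M.contains y then (3:Int) else 1))
              ++ T.map (fun y => (y, (2:Int))))) x 0 = 2 := by rw [hD]; simp [hT]
        have hC : PySem.Dict.contains (PySem.Dict.mk (s1d.map (fun y => (y, if M.contains y then (3:Int) else 1))
              ++ T.map (fun y => (y, (2:Int))))) x = true := by
          simp [hT]
        rw [hD', show PySem.Int.bor 2 2 = 2 by decide]
        have hins : (PySem.Dict.mk (s1d.map (fun y => (y, if M.contains y then (3:Int) else 1))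
              ++ T.map (fun y => (y, (2:Int))))).insert x 2
            = PySem.Dict.mk (s1d.map (fun y => (y, if M.contains y then (3:Int) else 1))
              ++ T.map (fun y => (y, (2:Int)))) := by
          apply PySem.Dict.ext
          rw [PySem.Dict.items_insert_of_contains _ _ hC]
          rw [List.map_append, List.map_map, List.map_map]
          congr 1
          · refine List.map_congr_left (fun y hy => ?_)
            have : y ≠ x := fun h => hm (h ▸ hy)
            simp [this]
          · refine List.map_congr_left (fun y _ => ?_)
            by_cases hyx : y = x
            · subst hyx; simp
            · simp [hyx]
        rw [hins, ih _ _ hdisj, hfilt, List.foldl_cons, PySem.Set.add_of_mem hT]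
        have hone : List.map (fun y => ((y : Int), if (M.contains y || xs.contains y) = true then (3:Int) else 1)) s1d
            = List.map (fun y => (y, if (M.contains y || (x :: xs).contains y) = true then (3:Int) else 1)) s1d := by
          refine List.map_congr_left (fun y hy => ?_)
          have hyx : y ≠ x := fun h => hm (h ▸ hy)
          simp [hyx]
        rw [hone]
      · have hD' : PySem.Dict.getD (PySem.Dict.mk (s1d.map (fun y => (y, if M.contains y then (3:Int) else 1))
              ++ T.map (fun y => (y, (2:Int))))) x 0 = 0 := by rw [hD]; simp [hT]
        have hC : PySem.Dict.contains (PySem.Dict.mk (s1d.map (fun y => (y, if M.contains y then (3:Int) else 1))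
              ++ T.map (fun y => (y, (2:Int))))) x = false := by
          simp
          exact ⟨fun y hy h => hm (h ▸ hy), fun y hy h => hT (h ▸ hy)⟩
        rw [hD', show PySem.Int.bor 0 2 = 2 by decide]
        have hins : (PySem.Dict.mk (s1d.map (fun y => (y, if M.contains y then (3:Int) else 1))
              ++ T.map (fun y => (y, (2:Int))))).insert x 2
            = PySem.Dict.mk (s1d.map (fun y => (y, if M.contains y then (3:Int) else 1))
              ++ (T ++ [x]).map (fun y => (y, (2:Int)))) := by
          apply PySem.Dict.ext
          rw [PySem.Dict.items_insert_of_not_contains _ _ hC]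
          rw [List.map_append, List.append_assoc]
          rfl
        have hdisj' : ∀ y ∈ T ++ [x], y ∉ s1d := by
          intro y hy
          rcases List.mem_append.mp hy with h | h
          · exact hdisj y h
          · simp at h; exact h ▸ hm
        rw [hins, ih _ _ hdisj', hfilt, List.foldl_cons, PySem.Set.add_of_not_mem hT]
        have hone : List.map (fun y => ((y : Int), if (M.contains y || xs.contains y) = true then (3:Int) else 1)) s1d
            = List.map (fun y => (y, if (M.contains y || (x :: xs).contains y) = true then (3:Int) else 1)) s1d := by
          refine List.map_congr_left (fun y hy => ?_)
          have hyx : y ≠ x := fun h => hm (h ▸ hy)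
          simp [hyx]
        rw [hone]

-- ===== VERDICT (by name: the statement is the Claim_ definition above) =====
theorem custom_symmetric_difference_spec : Claim_equal_custom_symmetric_difference := by
  intro s1 s2 _
  show custom_symmetric_difference s1 s2 = custom_symmetric_difference_alt s1 s2
  -- A's value: set(filter s1-only) ++ set(filter s2-only)
  have hofl : ∀ l : List Int, l.foldl PySem.Set.add PySem.Set.empty = PySem.Set.ofList l :=
    fun _ => rfl
  have hA : custom_symmetric_difference s1 s2
      = PySem.Set.ofList (s1.filter (fun i => !(s2.contains i)))
        ++ PySem.Set.ofList (s2.filter (fun i => !(s1.contains i))) := by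
    show (s2.foldl (fun d i => if !(s1.contains i) then PySem.Set.add d i else d)
        (s1.foldl (fun d i => if !(s2.contains i) then PySem.Set.add d i else d)
          PySem.Set.empty)) = _
    have hg1 := pv_fold_guard (fun i => !(s2.contains i)) id s1
    have hg2 := pv_fold_guard (fun i => !(s1.contains i)) id s2
    simp only [id_eq, List.map_id] at hg1 hg2
    rw [hg1, hg2, ← List.foldl_append, hofl]
    have hdisj : ∀ x ∈ (s2.filter fun i => !(s1.contains i)),
        x ∉ PySem.Set.ofList (s1.filter fun i => !(s2.contains i)) := by
      intro x hx hmem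
      have hx1 : x ∉ s1 := by simpa using List.of_mem_filter hx
      exact hx1 (List.mem_of_mem_filter ((PySem.Set.mem_ofList _ _).mp hmem))
    rw [PySem.Set.ofList, List.foldl_append, hofl]
    have := pv_foldl_add_disjoint (s2.filter fun i => !(s1.contains i))
      (PySem.Set.ofList (s1.filter fun i => !(s2.contains i))) [] hdisj
    simpa [PySem.Set.ofList, PySem.Set.empty] using this
  -- B's value: run the two tagging phases, then read off the kept keys
  have hphase1 := pv_phase1 s1 ([] : List Int)
  simp only [List.map_nil] at hphase1
  have hstart : PySem.Dict.mk ((s1.foldl PySem.Set.add []).map (fun y => (y, (1 : Int))))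
      = PySem.Dict.mk ((PySem.Set.ofList s1).map
          (fun y => (y, if ([] : List Int).contains y then (3:Int) else 1))
        ++ ([] : List Int).map (fun y => (y, (2 : Int)))) := by
    simp [PySem.Set.ofList]
  have hphase2 := pv_phase2 s2 (PySem.Set.ofList s1) [] [] (by simp)
  have htag : (s2.foldl (fun d x => d.insert x (PySem.Int.bor (d.getD x 0) 2))
        (s1.foldl (fun d x => d.insert x (PySem.Int.bor (d.getD x 0) 1)) PySem.Dict.empty)).items
      = (PySem.Set.ofList s1).map (fun y => (y, if s2.contains y then (3:Int) else 1))
        ++ (PySem.Set.ofList (s2.filter (fun x => !((PySem.Set.ofList s1).contains x)))).map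
            (fun y => (y, (2 : Int))) := by
    have hempty : (PySem.Dict.empty : PySem.Dict Int Int) = PySem.Dict.mk [] := rfl
    rw [hempty, hphase1, hstart, hphase2]
    simp [PySem.Set.ofList]
  have hB : custom_symmetric_difference_alt s1 s2
      = (PySem.Set.ofList s1).filter (fun y => !(s2.contains y))
        ++ PySem.Set.ofList (s2.filter (fun x => !((PySem.Set.ofList s1).contains x))) := by
    show (s2.foldl (fun d x => d.insert x (PySem.Int.bor (d.getD x 0) 2))
        (s1.foldl (fun d x => d.insert x (PySem.Int.bor (d.getD x 0) 1)) PySem.Dict.empty)).items.foldl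
          (fun s p => if p.2 != 3 then PySem.Set.add s p.1 else s) PySem.Set.empty = _
    rw [pv_fold_guard (fun p => p.2 != 3) Prod.fst, htag]
    -- compute the kept keys of the two blocks
    have hf1 : (((PySem.Set.ofList s1).map (fun y => (y, if s2.contains y then (3:Int) else 1))).filter
          (fun p => p.2 != 3)).map Prod.fst
        = (PySem.Set.ofList s1).filter (fun y => !(s2.contains y)) := by
      rw [List.filter_map, List.map_map]
      have h1 : ((fun p : Int × Int => p.2 != 3) ∘ (fun y => (y, if s2.contains y then (3:Int) else 1)))
          = fun y => !(s2.contains y) := by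
        funext y
        by_cases h : y ∈ s2
        · simp [Function.comp, h]
        · simp [Function.comp, h]
      rw [h1, show (Prod.fst ∘ fun y : Int => (y, if s2.contains y then (3:Int) else 1))
          = (id : Int → Int) from funext fun y => rfl, List.map_id]
    have hf2 : (((PySem.Set.ofList (s2.filter (fun x => !((PySem.Set.ofList s1).contains x)))).map
          (fun y => (y, (2:Int)))).filter (fun p => p.2 != 3)).map Prod.fst
        = PySem.Set.ofList (s2.filter (fun x => !((PySem.Set.ofList s1).contains x))) := by
      rw [List.filter_map, List.map_map]
      have h1 : ((fun p : Int × Int => p.2 != 3) ∘ (fun y : Int => (y, (2:Int)))) = fun _ => true := by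
        funext y; simp [Function.comp]
      rw [h1, List.filter_true, show (Prod.fst ∘ fun y : Int => (y, (2:Int)))
          = (id : Int → Int) from funext fun y => rfl, List.map_id]
    rw [List.filter_append, List.map_append, hf1, hf2]
    -- fold Set.add over the disjoint nodup concatenation is the identity
    have hP1 : PySem.Set.ofList ((PySem.Set.ofList s1).filter (fun y => !(s2.contains y)))
        = (PySem.Set.ofList s1).filter (fun y => !(s2.contains y)) :=
      PySem.Set.ofList_eq_self_of_nodup _ ((PySem.Set.nodup_ofList s1).filter _)
    have hdisj2 : ∀ x ∈ PySem.Set.ofList (s2.filter (fun x => !((PySem.Set.ofList s1).contains x))),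
        x ∉ (PySem.Set.ofList s1).filter (fun y => !(s2.contains y)) := by
      intro x hx hmem
      have hx1 : x ∉ PySem.Set.ofList s1 := by
        have := (PySem.Set.mem_ofList _ _).mp hx
        simpa using List.of_mem_filter this
      exact hx1 (List.mem_of_mem_filter hmem)
    calc ((PySem.Set.ofList s1).filter (fun y => !(s2.contains y))
            ++ PySem.Set.ofList (s2.filter (fun x => !((PySem.Set.ofList s1).contains x)))).foldl
            PySem.Set.add PySem.Set.empty
        = (PySem.Set.ofList (s2.filter (fun x => !((PySem.Set.ofList s1).contains x)))).foldl
            PySem.Set.add (PySem.Set.ofList ((PySem.Set.ofList s1).filter (fun y => !(s2.contains y)))) := by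
          rw [List.foldl_append, hofl]
      _ = (PySem.Set.ofList s1).filter (fun y => !(s2.contains y))
            ++ (PySem.Set.ofList (s2.filter (fun x => !((PySem.Set.ofList s1).contains x)))).foldl
                PySem.Set.add [] := by
          rw [hP1]
          have := pv_foldl_add_disjoint
            (PySem.Set.ofList (s2.filter (fun x => !((PySem.Set.ofList s1).contains x))))
            ((PySem.Set.ofList s1).filter (fun y => !(s2.contains y))) [] hdisj2
          simpa using this
      _ = (PySem.Set.ofList s1).filter (fun y => !(s2.contains y))
            ++ PySem.Set.ofList (s2.filter (fun x => !((PySem.Set.ofList s1).contains x))) := by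
          congr 1
          exact (hofl _).trans (PySem.Set.ofList_eq_self_of_nodup _ (PySem.Set.nodup_ofList _))
  -- the two characterisations coincide
  rw [hA, hB, ← pv_ofList_filter]
  congr 1
  refine congrArg PySem.Set.ofList (List.filter_congr (fun x _ => ?_))
  have : (PySem.Set.ofList s1).contains x = s1.contains x := by
    by_cases h : x ∈ s1
    · simp [PySem.Set.mem_ofList, h]
    · simp [PySem.Set.mem_ofList, h]
  rw [this]
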